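-- pv_equiv track=rewrite | github.com/Darwinnpos/autocodereview | app/services/ai_analyzer.py | _extract_diff_snippets
-- ===== SOURCE A (Python) =====
-- from typing import Dict, List, Optional, Any
--
-- def _extract_diff_snippets(diff_content: str, changed_lines: List[int]) -> str:
--     """从diff中提取变更片段，保留+/-标记显示变更类型"""
--     lines = diff_content.split('\n')
--     snippets = []
--     current_section = []
--     in_hunk = False
--
--     for line in lines:
--         if line.startswith('@@'):
--             # 新的差异块开始
--             if current_section:
--                 snippets.append('\n'.join(current_section))
--                 current_section = []
--             current_section.append(line)  # 添加hunk头
--             in_hunk = True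
--         elif in_hunk:
--             if line.startswith('+++') or line.startswith('---'):
--                 continue  # 跳过文件头
--             elif line.startswith('+') or line.startswith('-') or line.startswith(' '):
--                 current_section.append(line)
--             elif line.strip() == '':
--                 current_section.append(line)
--             else:
--                 # 块结束
--                 in_hunk = False
--
--     # 添加最后一个section
--     if current_section:
--         snippets.append('\n'.join(current_section))
--
--     return '\n\n'.join(snippets)
-- ===== SOURCE B (Python) =====
-- from typing import List
--
-- def _extract_diff_snippets(diff_content: str, changed_lines: List[int]) -> str:
--     """Index-based decomposition: locate '@@' hunk headers first, then build each section independently."""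
--     lines = diff_content.split('\n')
--     starts = [i for i, ln in enumerate(lines) if ln.startswith('@@')]
--     sections = []
--     for s in starts:
--         sec = [lines[s]]
--         for ln in lines[s + 1:]:
--             if ln.startswith('+++') or ln.startswith('---'):
--                 continue
--             if ln.startswith('+') or ln.startswith('-') or ln.startswith(' ') or ln.strip() == '':
--                 sec.append(ln)
--             else:
--                 break
--         sections.append('\n'.join(sec))
--     return '\n\n'.join(sections)
-- ===== Notes on version B (the rewrite author's own statement) =====
-- stated objective: alternative
-- what changed: Replaces A's single-pass in_hunk state machine with a two-phase decomposition: first collect the indices of all '@@' hunk-header lines, then rebuild each section independently from its header by scanning forward until the hunk breaks.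
import Mathlib
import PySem

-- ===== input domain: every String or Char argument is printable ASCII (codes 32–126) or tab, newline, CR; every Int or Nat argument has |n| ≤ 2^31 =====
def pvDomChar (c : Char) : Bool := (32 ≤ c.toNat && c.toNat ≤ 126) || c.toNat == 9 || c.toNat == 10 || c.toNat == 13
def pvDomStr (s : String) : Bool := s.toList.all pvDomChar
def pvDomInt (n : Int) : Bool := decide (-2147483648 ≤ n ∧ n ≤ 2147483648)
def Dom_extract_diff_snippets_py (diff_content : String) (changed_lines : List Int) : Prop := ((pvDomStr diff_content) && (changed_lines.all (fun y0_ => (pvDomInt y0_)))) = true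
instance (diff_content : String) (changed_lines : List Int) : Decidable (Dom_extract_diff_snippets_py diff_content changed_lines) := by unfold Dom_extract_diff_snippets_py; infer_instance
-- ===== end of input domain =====

-- B replaces A's single in_hunk state-machine pass by "find all '@@' header indices, then build each section independently from its start" (objective: alternative decomposition, same cost).

-- ===== PORT A =====
-- the 'for line in lines' loop of A, carried state (snippets, current_section, in_hunk)
def aLoop : List String → List String → List String → Bool → List String
  | [], snips, cur, _ =>
      -- final: if current_section: snippets.append('\n'.join(current_section))
      if cur = [] then snips else snips ++ [PySem.Str.join "\n" cur]
  | l :: rest, snips, cur, inHunk =>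
      if PySem.Str.startswith l "@@" then
        aLoop rest (if cur = [] then snips else snips ++ [PySem.Str.join "\n" cur]) [l] true
      else if inHunk then
        if PySem.Str.startswith l "+++" || PySem.Str.startswith l "---" then
          aLoop rest snips cur true
        else if PySem.Str.startswith l "+" || PySem.Str.startswith l "-" || PySem.Str.startswith l " " then
          aLoop rest snips (cur ++ [l]) true
        else if PySem.Str.strip l == "" then
          aLoop rest snips (cur ++ [l]) true
        else
          aLoop rest snips cur false
      else
        aLoop rest snips cur inHunk

def extract_diff_snippets_py (diff_content : String) (_changed_lines : List Int) : String :=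
  -- diff_content.split('\n'): separator is non-empty, so split? is always `some`
  let lines := (PySem.Str.split? diff_content "\n").getD []
  PySem.Str.join "\n\n" (aLoop lines [] [] false)

-- ===== PORT B =====
-- inner 'for ln in lines[s+1:]' loop of B (continue on file headers, collect hunk lines, break otherwise)
def bCollect : List String → List String
  | [] => []
  | l :: rest =>
      if PySem.Str.startswith l "+++" || PySem.Str.startswith l "---" then
        bCollect rest
      else if PySem.Str.startswith l "+" || PySem.Str.startswith l "-" || PySem.Str.startswith l " " || PySem.Str.strip l == "" then
        l :: bCollect rest
      else
        []

-- [i for i, ln in enumerate(lines) if ln.startswith('@@')], carrying the running index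
def bStarts : List String → Nat → List Nat
  | [], _ => []
  | l :: rest, i => if PySem.Str.startswith l "@@" then i :: bStarts rest (i + 1) else bStarts rest (i + 1)

def extract_diff_snippets_py_alt (diff_content : String) (_changed_lines : List Int) : String :=
  let lines := (PySem.Str.split? diff_content "\n").getD []
  let starts := bStarts lines 0
  -- lines[s] : s is an in-range index produced by enumerate, so getD is exact; lines[s+1:] = drop (s+1)
  let sections := starts.map (fun s =>
    PySem.Str.join "\n" (lines.getD s "" :: bCollect (lines.drop (s + 1))))
  PySem.Str.join "\n\n" sections

-- ===== PRECONDITION & SPEC =====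
def Spec_extract_diff_snippets_py (diff_content : String) (changed_lines : List Int) (out : String) : Prop := out = extract_diff_snippets_py_alt diff_content changed_lines
instance (diff_content : String) (changed_lines : List Int) (out : String) : Decidable (Spec_extract_diff_snippets_py diff_content changed_lines out) := by unfold Spec_extract_diff_snippets_py; infer_instance

-- ===== CLAIM (what is proved, stated in full; the proofs are below) =====
def Claim_equal_extract_diff_snippets_py : Prop := ∀ (diff_content : String) (changed_lines : List Int), Dom_extract_diff_snippets_py diff_content changed_lines → Spec_extract_diff_snippets_py diff_content changed_lines (extract_diff_snippets_py diff_content changed_lines)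

-- ===== LEMMAS AND PROOFS =====

-- the suffix of the line list left after bCollect stops (the break line and everything after it)
def gRest : List String → List String
  | [] => []
  | l :: rest =>
      if PySem.Str.startswith l "+++" || PySem.Str.startswith l "---" then
        gRest rest
      else if PySem.Str.startswith l "+" || PySem.Str.startswith l "-" || PySem.Str.startswith l " " || PySem.Str.strip l == "" then
        gRest rest
      else
        l :: rest

-- the list of sections, one per '@@' line, structurally
def bsecs : List String → List String
  | [] => []
  | l :: rest =>
      if PySem.Str.startswith l "@@" then
        PySem.Str.join "\n" (l :: bCollect rest) :: bsecs rest
      else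
        bsecs rest

theorem head_of_startswith {l p : String} {c : Char} {u : List Char}
    (hp : p.toList = c :: u) (h : PySem.Str.startswith l p = true) :
    ∃ t, l.toList = c :: t := by
  rw [PySem.Str.startswith_eq, PySem.Chars.startswith_iff, hp] at h
  rcases h with ⟨t, ht⟩
  exact ⟨u ++ t, by rw [← ht]; simp⟩

theorem startswith_false_of_head {l p : String} {c d : Char} {t : List Char} {u : List Char}
    (hl : l.toList = c :: t) (hp : p.toList = d :: u) (hne : d ≠ c) :
    PySem.Str.startswith l p = false := by
  rw [PySem.Str.startswith_eq, hl, hp]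
  rw [Bool.eq_false_iff]
  intro h
  rw [PySem.Chars.startswith_iff, List.cons_prefix_cons] at h
  exact hne h.1

theorem strip_ne_empty_of_head {l : String} {c : Char} {t : List Char}
    (hl : l.toList = c :: t) (hc : PySem.Chars.isspace c = false) :
    (PySem.Str.strip l == "") = false := by
  rw [Bool.eq_false_iff]
  intro h
  have he : PySem.Str.strip l = "" := by exact_mod_cast (beq_iff_eq).mp h
  have h2 : (PySem.Str.strip l).toList = [] := by rw [he]; rfl
  rw [PySem.Str.toList_strip, hl] at h2
  unfold PySem.Chars.strip PySem.Chars.lstrip PySem.Chars.rstrip at h2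
  rw [List.dropWhile_cons, hc] at h2
  simp only [List.reverse_eq_nil_iff, List.dropWhile_eq_nil_iff] at h2
  have := h2 c (by simp)
  rw [hc] at this
  exact absurd this (by simp)

-- a line starting with '@@' matches none of bCollect's continue/collect tests
theorem hdr_not_skip {l : String} (h : PySem.Str.startswith l "@@" = true) :
    (PySem.Str.startswith l "+++" || PySem.Str.startswith l "---") = false ∧
    (PySem.Str.startswith l "+" || PySem.Str.startswith l "-" || PySem.Str.startswith l " " || PySem.Str.strip l == "") = false := by
  obtain ⟨t, ht⟩ := head_of_startswith (p := "@@") (c := '@') (u := ['@']) rfl h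
  have h1 : PySem.Str.startswith l "+++" = false := startswith_false_of_head ht rfl (by decide)
  have h2 : PySem.Str.startswith l "---" = false := startswith_false_of_head ht rfl (by decide)
  have h3 : PySem.Str.startswith l "+" = false := startswith_false_of_head ht rfl (by decide)
  have h4 : PySem.Str.startswith l "-" = false := startswith_false_of_head ht rfl (by decide)
  have h5 : PySem.Str.startswith l " " = false := startswith_false_of_head ht rfl (by decide)
  have h6 : (PySem.Str.strip l == "") = false := strip_ne_empty_of_head ht (by decide)
  rw [h1, h2, h3, h4, h5, h6]
  exact ⟨rfl, rfl⟩

-- a line bCollect consumes (continue or collect) is never an '@@' header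
theorem consumed_not_hdr {l : String}
    (h : (PySem.Str.startswith l "+++" || PySem.Str.startswith l "---") = true ∨
         (PySem.Str.startswith l "+" || PySem.Str.startswith l "-" || PySem.Str.startswith l " " || PySem.Str.strip l == "") = true) :
    PySem.Str.startswith l "@@" = false := by
  rw [Bool.eq_false_iff]
  intro hh
  obtain ⟨h1, h2⟩ := hdr_not_skip hh
  rcases h with h | h
  · rw [h1] at h; exact absurd h (by simp)
  · rw [h2] at h; exact absurd h (by simp)

theorem bsecs_gRest : ∀ ls : List String, bsecs (gRest ls) = bsecs ls := by
  intro ls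
  induction ls with
  | nil => rfl
  | cons l rest ih =>
    by_cases h1 : (PySem.Str.startswith l "+++" || PySem.Str.startswith l "---") = true
    · have hstep : gRest (l :: rest) = gRest rest := by
        simp only [gRest]; rw [h1]; simp
      have hn := consumed_not_hdr (Or.inl h1)
      have hb : bsecs (l :: rest) = bsecs rest := by
        simp only [bsecs]; rw [hn]; simp
      rw [hstep, ih, hb]
    · have h1' : (PySem.Str.startswith l "+++" || PySem.Str.startswith l "---") = false :=
        Bool.eq_false_iff.mpr h1
      by_cases h2 : (PySem.Str.startswith l "+" || PySem.Str.startswith l "-" || PySem.Str.startswith l " " || PySem.Str.strip l == "") = true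
      · have hstep : gRest (l :: rest) = gRest rest := by
          simp only [gRest]; rw [h1', h2]; simp
        have hn := consumed_not_hdr (Or.inr h2)
        have hb : bsecs (l :: rest) = bsecs rest := by
          simp only [bsecs]; rw [hn]; simp
        rw [hstep, ih, hb]
      · have h2' := Bool.eq_false_iff.mpr h2
        have hstep : gRest (l :: rest) = l :: rest := by
          simp only [gRest]; rw [h1', h2']; simp
        rw [hstep]

-- A's loop computes, from any state, the already-finished snippets plus the structural section list
set_option maxHeartbeats 1600000 in
theorem aLoop_spec : ∀ (ls snips cur : List String),
    (aLoop ls snips cur false =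
      snips ++ (if cur = [] then bsecs ls else PySem.Str.join "\n" cur :: bsecs ls)) ∧
    (cur ≠ [] → aLoop ls snips cur true =
      snips ++ PySem.Str.join "\n" (cur ++ bCollect ls) :: bsecs (gRest ls)) := by
  intro ls
  induction ls with
  | nil =>
    intro snips cur
    constructor
    · by_cases hc : cur = [] <;> simp [aLoop, bsecs, hc]
    · intro hc
      simp [aLoop, bsecs, bCollect, gRest, hc]
  | cons l rest ih =>
    intro snips cur
    by_cases hh : PySem.Str.startswith l "@@" = true
    · -- header line: flush current_section and start a new one (same in both states)
      obtain ⟨hns, hnk⟩ := hdr_not_skip hh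
      have tail : ∀ s', aLoop rest s' [l] true =
          s' ++ PySem.Str.join "\n" ([l] ++ bCollect rest) :: bsecs (gRest rest) :=
        fun s' => (ih s' [l]).2 (by simp)
      have hbs : bsecs (l :: rest) = PySem.Str.join "\n" (l :: bCollect rest) :: bsecs rest := by
        simp only [bsecs]; rw [hh]; simp
      constructor
      · have step : aLoop (l :: rest) snips cur false =
            aLoop rest (if cur = [] then snips else snips ++ [PySem.Str.join "\n" cur]) [l] true := by
          simp only [aLoop]; rw [hh]; simp
        rw [step, tail, hbs, bsecs_gRest]
        by_cases hc : cur = [] <;> simp [hc]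
      · intro hc
        have step : aLoop (l :: rest) snips cur true =
            aLoop rest (snips ++ [PySem.Str.join "\n" cur]) [l] true := by
          simp only [aLoop]; rw [hh]; simp [hc]
        have hg : gRest (l :: rest) = l :: rest := by
          simp only [gRest]; rw [hns, hnk]; simp
        have hb : bCollect (l :: rest) = [] := by
          simp only [bCollect]; rw [hns, hnk]; simp
        rw [step, tail, hb, hg, hbs, bsecs_gRest]
        simp
    · have hh' : PySem.Str.startswith l "@@" = false := Bool.eq_false_iff.mpr hh
      constructor
      · -- not a header, not in a hunk: the line is ignored
        have step : aLoop (l :: rest) snips cur false = aLoop rest snips cur false := by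
          simp only [aLoop]; rw [hh']; simp
        have hbs : bsecs (l :: rest) = bsecs rest := by
          simp only [bsecs]; rw [hh']; simp
        rw [step, (ih snips cur).1, hbs]
      · intro hc
        by_cases h1 : (PySem.Str.startswith l "+++" || PySem.Str.startswith l "---") = true
        · -- file header line: skipped
          have step : aLoop (l :: rest) snips cur true = aLoop rest snips cur true := by
            simp only [aLoop]; rw [hh', h1]; simp
          have hb : bCollect (l :: rest) = bCollect rest := by
            simp only [bCollect]; rw [h1]; simp
          have hg : gRest (l :: rest) = gRest rest := by
            simp only [gRest]; rw [h1]; simp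
          rw [step, (ih snips cur).2 hc, hb, hg]
        · have h1' := Bool.eq_false_iff.mpr h1
          by_cases h2 : (PySem.Str.startswith l "+" || PySem.Str.startswith l "-" || PySem.Str.startswith l " " || PySem.Str.strip l == "") = true
          · -- hunk line: collected
            have step : aLoop (l :: rest) snips cur true = aLoop rest snips (cur ++ [l]) true := by
              by_cases h3 : (PySem.Str.startswith l "+" || PySem.Str.startswith l "-" || PySem.Str.startswith l " ") = true
              · simp only [aLoop]; rw [hh', h1', h3]; simp
              · have h3' := Bool.eq_false_iff.mpr h3
                have h4 : (PySem.Str.strip l == "") = true := by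
                  simp only [Bool.or_eq_true] at h2
                  simp only [Bool.or_eq_false_iff] at h3'
                  rcases h2 with ((ha | ha) | ha) | ha
                  · rw [h3'.1.1] at ha; exact absurd ha (by simp)
                  · rw [h3'.1.2] at ha; exact absurd ha (by simp)
                  · rw [h3'.2] at ha; exact absurd ha (by simp)
                  · exact ha
                simp only [aLoop]; rw [hh', h1', h3', h4]; simp
            have hb : bCollect (l :: rest) = l :: bCollect rest := by
              simp only [bCollect]; rw [h1', h2]; simp
            have hg : gRest (l :: rest) = gRest rest := by
              simp only [gRest]; rw [h1', h2]; simp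
            rw [step, (ih snips (cur ++ [l])).2 (by simp), hb, hg]
            simp
          · -- hunk ends: in_hunk := False, current_section kept
            have h2' := Bool.eq_false_iff.mpr h2
            obtain ⟨h3, h4⟩ : (PySem.Str.startswith l "+" || PySem.Str.startswith l "-" || PySem.Str.startswith l " ") = false ∧ (PySem.Str.strip l == "") = false := by
              simp only [Bool.or_eq_false_iff] at h2' ⊢
              tauto
            have step : aLoop (l :: rest) snips cur true = aLoop rest snips cur false := by
              simp only [aLoop]; rw [hh', h1', h3, h4]; simp
            have hb : bCollect (l :: rest) = [] := by
              simp only [bCollect]; rw [h1', h2']; simp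
            have hg : gRest (l :: rest) = l :: rest := by
              simp only [gRest]; rw [h1', h2']; simp
            have hbs : bsecs (l :: rest) = bsecs rest := by
              simp only [bsecs]; rw [hh']; simp
            rw [step, (ih snips cur).1, if_neg hc, hb, hg, hbs]
            simp

-- B's index-then-rebuild pass produces the same structural section list
theorem bStarts_map : ∀ (ls pref : List String),
    (bStarts ls pref.length).map (fun s =>
      PySem.Str.join "\n" ((pref ++ ls).getD s "" :: bCollect ((pref ++ ls).drop (s + 1)))) = bsecs ls := by
  intro ls
  induction ls with
  | nil => intro pref; rfl
  | cons l rest ih =>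
    intro pref
    have hget : (pref ++ l :: rest).getD pref.length "" = l := by
      simp [List.getD_eq_getElem?_getD]
    have hdrop : (pref ++ l :: rest).drop (pref.length + 1) = rest := by
      rw [List.drop_append]
      simp
    have hassoc : pref ++ l :: rest = (pref ++ [l]) ++ rest := by simp
    have hlen : (pref ++ [l]).length = pref.length + 1 := by simp
    have htail : (bStarts rest (pref.length + 1)).map (fun s =>
        PySem.Str.join "\n" ((pref ++ l :: rest).getD s "" :: bCollect ((pref ++ l :: rest).drop (s + 1)))) = bsecs rest := by
      rw [hassoc, ← hlen]
      exact ih (pref ++ [l])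
    by_cases hh : PySem.Str.startswith l "@@" = true
    · have hs : bStarts (l :: rest) pref.length = pref.length :: bStarts rest (pref.length + 1) := by
        simp only [bStarts]; rw [hh]; simp
      have hbs : bsecs (l :: rest) = PySem.Str.join "\n" (l :: bCollect rest) :: bsecs rest := by
        simp only [bsecs]; rw [hh]; simp
      rw [hs, List.map_cons, hget, hdrop, htail, hbs]
    · have hh' := Bool.eq_false_iff.mpr hh
      have hs : bStarts (l :: rest) pref.length = bStarts rest (pref.length + 1) := by
        simp only [bStarts]; rw [hh']; simp
      have hbs : bsecs (l :: rest) = bsecs rest := by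
        simp only [bsecs]; rw [hh']; simp
      rw [hs, htail, hbs]

-- ===== VERDICT (by name: the statement is the Claim_ definition above) =====
theorem extract_diff_snippets_py_spec : Claim_equal_extract_diff_snippets_py := by
  intro diff_content changed_lines _
  unfold Spec_extract_diff_snippets_py
  simp only [extract_diff_snippets_py, extract_diff_snippets_py_alt]
  have hA : aLoop ((PySem.Str.split? diff_content "\n").getD []) [] [] false =
      bsecs ((PySem.Str.split? diff_content "\n").getD []) := by
    rw [(aLoop_spec ((PySem.Str.split? diff_content "\n").getD []) [] []).1]
    simp
  have hB := bStarts_map ((PySem.Str.split? diff_content "\n").getD []) []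
  simp only [List.length_nil, List.nil_append] at hB
  rw [hA, ← hB]
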